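-- pv_equiv track=rewrite | github.com/ellaangel/web-app-subnet-calculator | app/backend.py | ip_validation
-- ===== SOURCE A (Python) =====
-- def ip_validation(ip):
--     octets = ip.split(".")  #Splits the IP into its 4 octets
--
--     if len(octets) != 4:    #Checks if there are exactly 4 octets
--         return False, None
--
--     for octet in octets:      ##Ensures each octet is a number
--         if not octet.isdigit():
--             return False, None
--         num = int(octet)
--         if num < 0 or num > 255:   #Ensures each octet is a number between 0 and 255
--             return False, None
--
--     if 0 <= int(octets[0]) <= 127:
--         return True, "A"
--     elif 128 <= int(octets[0]) <= 191:
--         return True, "B"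
--     elif 192 <= int(octets[0]) <= 223:
--         return True, "C"
--     elif 224 <= int(octets[0]) <= 239:
--         return True, "D (Multicast Address Range), Not defined"
--     elif 240 <= int(octets[0]) <= 255:
--         return True, "E (Reserved Only), Not defined"
--     else:
--         return False, None
-- ===== SOURCE B (Python) =====
-- CLASS_LABELS = ["A", "B", "C",
--                 "D (Multicast Address Range), Not defined",
--                 "E (Reserved Only), Not defined"]
--
-- def ip_validation(ip):
--     parts = ip.split(".")
--     if len(parts) != 4 or not all(p.isdigit() and 0 <= int(p) <= 255 for p in parts):
--         return False, None
--     # IPv4 classes are defined by the leading one-bits of the first octet: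
--     # 0xxx->A, 10xx->B, 110x->C, 1110->D, 1111->E.  Count them and index a table.
--     first = int(parts[0])
--     k = 0
--     for bit in (128, 64, 32, 16):
--         if first & bit == 0:
--             break
--         k += 1
--     return True, CLASS_LABELS[k]
-- ===== Notes on version B (the rewrite author's own statement) =====
-- stated objective: alternative
-- what changed: Replaces A's five-range if/elif ladder by counting the leading one-bits of the first octet (the bit pattern that defines IPv4 classes) and indexing a label table, and replaces A's early-return validation loop by a single all() pass.
import Mathlib
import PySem

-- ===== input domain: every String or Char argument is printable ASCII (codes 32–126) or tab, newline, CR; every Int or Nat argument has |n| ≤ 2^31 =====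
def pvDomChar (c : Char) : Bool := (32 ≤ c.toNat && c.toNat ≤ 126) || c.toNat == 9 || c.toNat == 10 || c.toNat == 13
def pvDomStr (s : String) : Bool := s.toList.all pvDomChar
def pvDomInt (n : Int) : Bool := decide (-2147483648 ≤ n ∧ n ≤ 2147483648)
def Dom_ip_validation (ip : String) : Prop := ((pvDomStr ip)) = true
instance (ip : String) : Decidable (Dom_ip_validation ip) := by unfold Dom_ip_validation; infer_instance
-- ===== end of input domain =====

-- B classifies by counting the leading one-bits of the first octet (the bit pattern that
-- defines IPv4 classes) and indexing a label table, instead of A's five-range if/elif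
-- ladder, and validates with one all() pass instead of A's early-return loop (alternative).

-- ===== PORT A =====
-- A's per-octet loop: early return (false, none) on the first bad octet.
-- int(octet) is reached only after octet.isdigit() succeeded, so ofStr? is some there;
-- the .getD 0 default is never used on the reached branch.
def ipvCheckA : List String → Bool
  | [] => true
  | o :: rest =>
    if PySem.Str.strIsdigit o = false then false
    else
      let num := (PySem.Int.ofStr? o).getD 0
      if num < 0 ∨ num > 255 then false else ipvCheckA rest

def ip_validation (ip : String) : Bool × Option String :=
  let octets := (PySem.Str.split? ip ".").getD []   -- "." ≠ "" so split? is always some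
  if octets.length ≠ 4 then (false, none)
  else if ipvCheckA octets = false then (false, none)
  else
    let n0 := (PySem.Int.ofStr? ((PySem.List.pyGet? octets 0).getD "")).getD 0
    if 0 ≤ n0 ∧ n0 ≤ 127 then (true, some "A")
    else if 128 ≤ n0 ∧ n0 ≤ 191 then (true, some "B")
    else if 192 ≤ n0 ∧ n0 ≤ 223 then (true, some "C")
    else if 224 ≤ n0 ∧ n0 ≤ 239 then (true, some "D (Multicast Address Range), Not defined")
    else if 240 ≤ n0 ∧ n0 ≤ 255 then (true, some "E (Reserved Only), Not defined")
    else (false, none)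

-- ===== PORT B =====
def ipvLabels : List String :=
  ["A", "B", "C",
   "D (Multicast Address Range), Not defined",
   "E (Reserved Only), Not defined"]

-- p.isdigit() and 0 <= int(p) <= 255 (int(p) reached only when isdigit holds, so getD 0 is never used)
def ipvOk (p : String) : Bool :=
  PySem.Str.strIsdigit p &&
    decide (0 ≤ (PySem.Int.ofStr? p).getD 0 ∧ (PySem.Int.ofStr? p).getD 0 ≤ 255)

-- the for-bit-in-(128,64,32,16) loop with break: k = number of leading masks hit before the break
def ipvLead (num : Int) : List Int → Nat
  | [] => 0
  | b :: rest => if PySem.Int.band num b = 0 then 0 else 1 + ipvLead num rest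

def ip_validation_alt (ip : String) : Bool × Option String :=
  let parts := (PySem.Str.split? ip ".").getD []
  if parts.length ≠ 4 ∨ parts.all ipvOk = false then (false, none)
  else
    let first := (PySem.Int.ofStr? ((PySem.List.pyGet? parts 0).getD "")).getD 0
    let k := ipvLead first [128, 64, 32, 16]
    (true, some ((PySem.List.pyGet? ipvLabels (k : Int)).getD ""))

-- ===== PRECONDITION & SPEC =====
def Spec_ip_validation (ip : String) (out : Bool × Option String) : Prop := out = ip_validation_alt ip
instance (ip : String) (out : Bool × Option String) : Decidable (Spec_ip_validation ip out) := by unfold Spec_ip_validation; infer_instance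

-- ===== CLAIM =====
def Claim_equal_ip_validation : Prop := ∀ (ip : String), Dom_ip_validation ip → Spec_ip_validation ip (ip_validation ip)

-- ===== LEMMAS AND PROOFS =====
lemma ipvCheckA_eq_all (l : List String) : ipvCheckA l = l.all ipvOk := by
  induction l with
  | nil => rfl
  | cons o rest ih =>
    simp only [ipvCheckA, List.all_cons, ipvOk, ← ih]
    by_cases h1 : (PySem.Int.ofStr? o).getD 0 < 0 <;>
      by_cases h2 : 255 < (PySem.Int.ofStr? o).getD 0 <;>
      by_cases hd : PySem.Str.strIsdigit o = true <;>
      simp_all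

-- A's range ladder equals B's leading-one-bit count for every octet value 0..255
lemma band_pow_zero_iff (m k : Nat) : (m &&& 2^k = 0) ↔ m / 2^k % 2 = 0 := by
  rw [Nat.and_two_pow, Nat.testBit_eq_decide_div_mod_eq]
  by_cases h : m / 2^k % 2 = 1
  · simp [h]
  · simp [h]; omega

lemma k_eq (m : Nat) (hm : m < 256) : ipvLead (m : Int) [128, 64, 32, 16] =
    (if m ≤ 127 then 0 else if m ≤ 191 then 1 else if m ≤ 223 then 2 else if m ≤ 239 then 3 else 4) := by
  simp only [ipvLead]
  rw [show (128:Int) = ((128:Nat):Int) from rfl, show (64:Int) = ((64:Nat):Int) from rfl,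
      show (32:Int) = ((32:Nat):Int) from rfl, show (16:Int) = ((16:Nat):Int) from rfl]
  simp only [PySem.Int.band_natCast, Int.natCast_eq_zero,
    show (128:Nat) = 2^7 from rfl, show (64:Nat) = 2^6 from rfl,
    show (32:Nat) = 2^5 from rfl, show (16:Nat) = 2^4 from rfl,
    band_pow_zero_iff]
  norm_num
  split_ifs <;> omega

lemma ipv_classify (m : Nat) (hm : m < 256) :
    (if 0 ≤ (m : Int) ∧ (m : Int) ≤ 127 then ((true : Bool), some "A")
     else if 128 ≤ (m : Int) ∧ (m : Int) ≤ 191 then (true, some "B")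
     else if 192 ≤ (m : Int) ∧ (m : Int) ≤ 223 then (true, some "C")
     else if 224 ≤ (m : Int) ∧ (m : Int) ≤ 239 then (true, some "D (Multicast Address Range), Not defined")
     else if 240 ≤ (m : Int) ∧ (m : Int) ≤ 255 then (true, some "E (Reserved Only), Not defined")
     else ((false : Bool), (none : Option String))) =
    (true, some ((PySem.List.pyGet? ipvLabels ((ipvLead (m : Int) [128, 64, 32, 16] : Nat) : Int)).getD "")) := by
  rw [k_eq m hm]
  split_ifs <;> first | rfl | omega

lemma ipv_body_eq (parts : List String) (h4 : parts.length = 4)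
    (hall : parts.all ipvOk = true) :
    (let n0 := (PySem.Int.ofStr? ((PySem.List.pyGet? parts 0).getD "")).getD 0
     if 0 ≤ n0 ∧ n0 ≤ 127 then ((true : Bool), some "A")
     else if 128 ≤ n0 ∧ n0 ≤ 191 then (true, some "B")
     else if 192 ≤ n0 ∧ n0 ≤ 223 then (true, some "C")
     else if 224 ≤ n0 ∧ n0 ≤ 239 then (true, some "D (Multicast Address Range), Not defined")
     else if 240 ≤ n0 ∧ n0 ≤ 255 then (true, some "E (Reserved Only), Not defined")
     else (false, none)) =
    (let first := (PySem.Int.ofStr? ((PySem.List.pyGet? parts 0).getD "")).getD 0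
     (true, some ((PySem.List.pyGet? ipvLabels ((ipvLead first [128, 64, 32, 16] : Nat) : Int)).getD ""))) := by
  obtain ⟨o, rest, rfl⟩ : ∃ o rest, parts = o :: rest := by
    cases parts with
    | nil => simp at h4
    | cons o rest => exact ⟨o, rest, rfl⟩
  have hok : ipvOk o = true := by
    simp only [List.all_cons, Bool.and_eq_true] at hall; exact hall.1
  have hb : 0 ≤ (PySem.Int.ofStr? o).getD 0 ∧ (PySem.Int.ofStr? o).getD 0 ≤ 255 := by
    simp only [ipvOk, Bool.and_eq_true, decide_eq_true_eq] at hok; exact hok.2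
  simp only [PySem.List.pyGet?_zero_cons, Option.getD_some]
  set v := (PySem.Int.ofStr? o).getD 0 with hv
  have hm : ((v.toNat : Nat) : Int) = v := Int.toNat_of_nonneg hb.1
  have hlt : v.toNat < 256 := by omega
  have := ipv_classify v.toNat hlt
  rw [hm] at this
  exact this

theorem ip_validation_spec_aux (ip : String) :
    ip_validation ip = ip_validation_alt ip := by
  unfold ip_validation ip_validation_alt
  generalize (PySem.Str.split? ip ".").getD [] = parts
  by_cases h4 : parts.length = 4
  · simp only [h4, if_neg (by omega : ¬ (4 : Nat) ≠ 4)]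
    rw [ipvCheckA_eq_all]
    by_cases hall : parts.all ipvOk = true
    · simp only [hall, Bool.true_eq_false, if_false]
      simpa using ipv_body_eq parts h4 hall
    · rw [Bool.not_eq_true] at hall
      simp [hall]
  · simp [h4]

-- ===== VERDICT =====
theorem ip_validation_spec : Claim_equal_ip_validation := by
  intro ip _
  exact ip_validation_spec_aux ip
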